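-- pv_equiv track=rewrite | github.com/syha6821/advent-of-code | 2019/17/2.py | remove_pattern
-- ===== SOURCE A (Python) =====
-- def remove_pattern(string,pattern):
--     if string.startswith(pattern):
--         string = string.removeprefix(pattern).strip(',')
--         return remove_pattern(string,pattern)
--     elif string.endswith(pattern):
--         string = string.removesuffix(pattern)
--         return remove_pattern(string,pattern).strip(',')
--     else:
--         return string
-- ===== SOURCE B (Python) =====
-- def remove_pattern(string, pattern):
--     # Phase 1: peel the pattern off the front, comma-stripping between peels.
--     while string.startswith(pattern):
--         string = string.removeprefix(pattern).strip(',')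
--     # Phase 2: the back now sheds whole copies of the pattern; count them directly.
--     k = 0
--     while string.endswith(pattern * (k + 1)):
--         k += 1
--     if k:
--         string = string[:len(string) - k * len(pattern)].strip(',')
--     return string
-- ===== Notes on version B (the rewrite author's own statement) =====
-- stated objective: alternative
-- what changed: Replaced A's single interleaved recursion by two staged passes: a front loop peeling prefixes (with comma strips), then a direct count of the largest k with string.endswith(pattern*k), one slice removing all k suffix copies at once, and one final comma strip iff k>0.
import Mathlib
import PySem

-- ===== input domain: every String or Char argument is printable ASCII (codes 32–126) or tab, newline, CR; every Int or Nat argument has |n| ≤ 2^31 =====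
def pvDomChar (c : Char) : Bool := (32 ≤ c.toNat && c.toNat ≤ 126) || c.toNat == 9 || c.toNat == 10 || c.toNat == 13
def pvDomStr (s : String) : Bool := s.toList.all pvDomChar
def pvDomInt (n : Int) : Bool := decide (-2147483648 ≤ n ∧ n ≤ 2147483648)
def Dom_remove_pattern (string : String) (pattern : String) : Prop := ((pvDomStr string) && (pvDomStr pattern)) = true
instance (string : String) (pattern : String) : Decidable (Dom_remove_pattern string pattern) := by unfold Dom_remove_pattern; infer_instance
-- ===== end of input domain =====

-- B replaces A's interleaved recursion by two staged passes: peel prefixes, then count and cut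
-- all suffix copies at once (objective: alternative decomposition; same cost).

-- ===== PORT A =====
-- fuelled rendering of A's recursion on List Char; every recursive call shrinks the string by at
-- least |pattern| chars, so fuel = length+1 never runs out when pattern ≠ "" (= Pre_).
def pvGoA : Nat → List Char → List Char → List Char
  | 0, s, _ => s
  | fuel+1, s, p =>
    if PySem.Chars.startswith s p then
      -- string = string.removeprefix(pattern).strip(',')  (prefix is present, so drop is exact)
      pvGoA fuel (PySem.Chars.stripChars (s.drop p.length) [',']) p
    else if PySem.Chars.endswith s p then
      -- return remove_pattern(string.removesuffix(pattern), pattern).strip(',')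
      PySem.Chars.stripChars (pvGoA fuel (s.take (s.length - p.length)) p) [',']
    else s

def remove_pattern (string : String) (pattern : String) : String :=
  String.ofList (pvGoA (string.toList.length + 1) string.toList pattern.toList)

-- ===== PORT B =====
-- phase 1: `while string.startswith(pattern): string = string.removeprefix(pattern).strip(',')`
-- fuelled; fuel = length+1 suffices since each turn removes ≥ |pattern| ≥ 1 chars.
def pvPhase1 : Nat → List Char → List Char → List Char
  | 0, s, _ => s
  | fuel+1, s, p =>
    if PySem.Chars.startswith s p then
      pvPhase1 fuel (PySem.Chars.stripChars (s.drop p.length) [',']) p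
    else s

-- `pattern * n`
def pvRep (n : Nat) (p : List Char) : List Char := (List.replicate n p).flatten

-- phase 2 counter: `while string.endswith(pattern * (k + 1)): k += 1`; fuel = length+1 suffices.
def pvCount : Nat → List Char → List Char → Nat → Nat
  | 0, _, _, k => k
  | fuel+1, s, p, k =>
    if PySem.Chars.endswith s (pvRep (k+1) p) then pvCount fuel s p (k+1) else k

-- `string[:len(string) - k*len(pattern)]` is `take` (the bound is ≥ 0: k suffix copies fit in s1)
def remove_pattern_alt (string : String) (pattern : String) : String :=
  let p := pattern.toList
  let s1 := pvPhase1 (string.toList.length + 1) string.toList p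
  let k := pvCount (s1.length + 1) s1 p 0
  if k = 0 then String.ofList s1
  else String.ofList (PySem.Chars.stripChars (s1.take (s1.length - k * p.length)) [','])

-- ===== PRECONDITION & SPEC =====
-- Pre_ excludes pattern = "", on which Python A raises RecursionError (and B loops forever).
def Pre_remove_pattern (string : String) (pattern : String) : Prop := pattern ≠ ""
instance (string : String) (pattern : String) : Decidable (Pre_remove_pattern string pattern) := by unfold Pre_remove_pattern; infer_instance
def pvWitness_remove_pattern : String × String := (",ab,cd,ab", "ab")

def Spec_remove_pattern (string : String) (pattern : String) (out : String) : Prop := out = remove_pattern_alt string pattern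
instance (string : String) (pattern : String) (out : String) : Decidable (Spec_remove_pattern string pattern out) := by unfold Spec_remove_pattern; infer_instance

-- ===== CLAIM (what is proved, stated in full; the proofs are below) =====
def Claim_equal_remove_pattern : Prop := ∀ (string : String) (pattern : String), Dom_remove_pattern string pattern → Pre_remove_pattern string pattern → Spec_remove_pattern string pattern (remove_pattern string pattern)

-- ===== LEMMAS AND PROOFS =====

-- abbreviation used only in the proofs
def pvStrip (s : List Char) : List Char := PySem.Chars.stripChars s [',']

-- B's suffix stage, as a function of the phase-1 output
def pvSufRes (s p : List Char) : List Char :=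
  if pvCount (s.length + 1) s p 0 = 0 then s
  else pvStrip (s.take (s.length - pvCount (s.length + 1) s p 0 * p.length))

theorem pvStrip_length_le (s : List Char) : (pvStrip s).length ≤ s.length := by
  simp only [pvStrip, PySem.Chars.stripChars]
  calc ((List.dropWhile _ (List.dropWhile _ s).reverse).reverse).length
      ≤ (List.dropWhile _ s).reverse.length := by
        rw [List.length_reverse]; exact List.length_dropWhile_le _ _
    _ ≤ s.length := by rw [List.length_reverse]; exact List.length_dropWhile_le _ _

theorem dropWhile_idem (p : Char → Bool) (l : List Char) :
    List.dropWhile p (List.dropWhile p l) = List.dropWhile p l := by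
  induction l with
  | nil => rfl
  | cons a t ih =>
    by_cases h : p a = true
    · simp [List.dropWhile, h, ih]
    · simp [List.dropWhile, h]

-- the doubly-stripped list starts (and ends) with a kept character, so a further dropWhile is the identity
theorem pvStripCore (p : Char → Bool) (s : List Char) :
    List.dropWhile p (List.dropWhile p (List.dropWhile p s).reverse).reverse
      = (List.dropWhile p (List.dropWhile p s).reverse).reverse := by
  set u := List.dropWhile p s with hu
  set d := List.dropWhile p u.reverse with hd
  have hpre : d.reverse <+: u :=
    List.reverse_suffix.mp (by rw [List.reverse_reverse]; exact List.dropWhile_suffix p)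
  rw [List.dropWhile_eq_self_iff]
  intro hl
  have hne : d.reverse ≠ [] := by
    intro h; rw [h] at hl; simp at hl
  have hune : u ≠ [] := by
    intro h; rw [h, List.prefix_nil] at hpre; exact hne hpre
  have hul : 0 < u.length := List.length_pos_iff.mpr hune
  have hu0 : ¬ p u[0] = true :=
    List.dropWhile_eq_self_iff.mp (dropWhile_idem p s) hul
  have hhead := hpre.head hne
  rwa [← List.head_eq_getElem hne, hhead, List.head_eq_getElem]

theorem pvStrip_idem (s : List Char) : pvStrip (pvStrip s) = pvStrip s := by
  simp only [pvStrip, PySem.Chars.stripChars]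
  rw [pvStripCore (fun c => List.contains [','] c) s, List.reverse_reverse]
  exact congrArg List.reverse (dropWhile_idem _ _)

theorem pvRep_length (n : Nat) (p : List Char) : (pvRep n p).length = n * p.length := by
  simp [pvRep, List.sum_replicate]

theorem pvRep_one (p : List Char) : pvRep 1 p = p := by simp [pvRep]

theorem pvRep_succ_back (n : Nat) (p : List Char) : pvRep (n+1) p = pvRep n p ++ p := by
  simp [pvRep, List.replicate_succ']

theorem suffix_append_cancel (a b c : List Char) : a ++ c <:+ b ++ c ↔ a <:+ b := by
  rw [← List.reverse_prefix]
  simp [List.reverse_append]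

-- if p is a suffix of s, then s = s.take (s.length - p.length) ++ p
theorem take_append_of_suffix (s p : List Char) (h : p <:+ s) :
    s.take (s.length - p.length) ++ p = s := by
  obtain ⟨t, ht⟩ := h
  have hlen : s.length - p.length = t.length := by
    subst ht; simp
  rw [hlen, ← ht, List.take_left]

theorem endswith_length_le (s t : List Char) (h : PySem.Chars.endswith s t = true) :
    t.length ≤ s.length :=
  ((PySem.Chars.endswith_iff _ _).mp h).length_le

-- counting stops as soon as the next copy would not fit
theorem pvCount_done (s p : List Char) (j : Nat) (f : Nat)
    (h : s.length < (j+1) * p.length) : pvCount f s p j = j := by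
  cases f with
  | zero => rfl
  | succ f =>
    have hne : ¬ PySem.Chars.endswith s (pvRep (j+1) p) = true := by
      intro he
      have := endswith_length_le _ _ he
      rw [pvRep_length] at this
      omega
    simp [pvCount, hne]

-- one suffix copy removed shifts the count by one (same fuel on both sides)
theorem pvCount_shift (t p : List Char) (hp : p ≠ []) :
    ∀ f j, (t ++ p).length ≤ f + j * p.length →
      pvCount f (t ++ p) p (j+1) = pvCount f t p j + 1 := by
  have hplen : 0 < p.length := List.length_pos_iff.mpr hp
  intro f
  induction f with
  | zero => intro j _; rfl
  | succ f ih =>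
    intro j hj
    have hcond : PySem.Chars.endswith (t ++ p) (pvRep (j+2) p)
        = PySem.Chars.endswith t (pvRep (j+1) p) := by
      rw [Bool.eq_iff_iff, PySem.Chars.endswith_iff, PySem.Chars.endswith_iff,
        pvRep_succ_back, suffix_append_cancel]
    have hmul : (j+1) * p.length = j * p.length + p.length := by ring
    have hlap : (t ++ p).length = t.length + p.length := by simp
    by_cases hc : PySem.Chars.endswith t (pvRep (j+1) p) = true
    · simp only [pvCount, hcond, if_pos hc]
      exact ih (j+1) (by omega)
    · simp only [pvCount, hcond, if_neg hc]

-- the counter's value is fuel-independent once the fuel covers the string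
theorem pvCount_stable (s p : List Char) (hp : p ≠ []) :
    ∀ f g j, s.length ≤ f + j * p.length → s.length ≤ g + j * p.length →
      pvCount f s p j = pvCount g s p j := by
  have hplen : 0 < p.length := List.length_pos_iff.mpr hp
  intro f
  induction f with
  | zero =>
    intro g j hf hg
    have hmul : (j+1) * p.length = j * p.length + p.length := by ring
    rw [pvCount, pvCount_done s p j g (by omega)]
  | succ f ih =>
    intro g j hf hg
    have hmul : (j+1) * p.length = j * p.length + p.length := by ring
    cases g with
    | zero =>
      rw [pvCount, pvCount_done s p j (f+1) (by omega)]
    | succ g =>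
      by_cases hc : PySem.Chars.endswith s (pvRep (j+1) p) = true
      · simp only [pvCount, if_pos hc]
        exact ih g (j+1) (by omega) (by omega)
      · simp only [pvCount, if_neg hc]

-- top-level count: zero when the pattern is not a suffix …
theorem pvCount_top_zero (s p : List Char) (h : PySem.Chars.endswith s p = false) :
    pvCount (s.length + 1) s p 0 = 0 := by
  simp [pvCount, pvRep_one, h]

-- … and one more than the count of the string with one copy removed
theorem pvCount_top_succ (s p : List Char) (hp : p ≠ [])
    (he : PySem.Chars.endswith s p = true) :
    pvCount (s.length + 1) s p 0
      = pvCount ((s.take (s.length - p.length)).length + 1) (s.take (s.length - p.length)) p 0 + 1 := by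
  have hplen : 0 < p.length := List.length_pos_iff.mpr hp
  have hle : p.length ≤ s.length := endswith_length_le s p he
  have hdec := take_append_of_suffix s p ((PySem.Chars.endswith_iff _ _).mp he)
  have hlen' : (s.take (s.length - p.length)).length = s.length - p.length := by
    rw [List.length_take]; omega
  rw [show pvCount (s.length + 1) s p 0
      = if PySem.Chars.endswith s (pvRep 1 p) then pvCount s.length s p 1 else 0 from rfl,
    pvRep_one, if_pos he]
  conv_lhs => rw [← hdec]
  rw [pvCount_shift (s.take (s.length - p.length)) p hp
      ((s.take (s.length - p.length) ++ p).length) 0 (by omega),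
    pvCount_stable (s.take (s.length - p.length)) p hp
      ((s.take (s.length - p.length) ++ p).length)
      ((s.take (s.length - p.length)).length + 1) 0
      (by simp [List.length_append]) (by omega)]

-- a failed prefix test survives removing a suffix copy
theorem no_prefix_take (s p : List Char) (h : ¬ p <+: s) (n : Nat) : ¬ p <+: s.take n :=
  fun hp => h (hp.trans (s.take_prefix n))

-- A's recursion on a string with no leading copy equals B's count-and-cut suffix stage
theorem pvGoA_suffix (p : List Char) (hp : p ≠ []) :
    ∀ f s, s.length < f → ¬ p <+: s → pvGoA f s p = pvSufRes s p := by
  have hplen : 0 < p.length := List.length_pos_iff.mpr hp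
  intro f
  induction f with
  | zero => intro s hs; omega
  | succ f ih =>
    intro s hs hpre
    have hsw : ¬ PySem.Chars.startswith s p = true := by
      rw [PySem.Chars.startswith_iff]; exact hpre
    by_cases he : PySem.Chars.endswith s p = true
    · have hle : p.length ≤ s.length := endswith_length_le s p he
      have hlen' : (s.take (s.length - p.length)).length = s.length - p.length := by
        rw [List.length_take]; omega
      have hs'lt : (s.take (s.length - p.length)).length < f := by omega
      have hpre' : ¬ p <+: s.take (s.length - p.length) := no_prefix_take s p hpre _
      have hA : pvGoA (f+1) s p
          = pvStrip (pvGoA f (s.take (s.length - p.length)) p) := by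
        simp [pvGoA, hsw, he, pvStrip]
      rw [hA, ih _ hs'lt hpre']
      have hktop := pvCount_top_succ s p hp he
      unfold pvSufRes
      rw [hktop, hlen']
      by_cases hk0 : pvCount ((s.take (s.length - p.length)).length + 1)
          (s.take (s.length - p.length)) p 0 = 0
      · rw [hlen'] at hk0
        rw [if_pos hk0, hk0]
        norm_num
      · rw [hlen'] at hk0
        rw [if_neg hk0, if_neg (by omega), pvStrip_idem]
        congr 1
        rw [List.take_take]
        congr 1
        set k' := pvCount (s.length - p.length + 1) (s.take (s.length - p.length)) p 0 with hk'
        have hmul : (k' + 1) * p.length = k' * p.length + p.length := by ring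
        omega
    · have hk := pvCount_top_zero s p (by rwa [Bool.eq_false_iff])
      simp [pvGoA, hsw, he, pvSufRes, hk]

-- main: A's recursion = phase 1 followed by the suffix stage (same fuel)
theorem pvGoA_eq (p : List Char) (hp : p ≠ []) :
    ∀ f s, s.length < f → pvGoA f s p = pvSufRes (pvPhase1 f s p) p := by
  have hplen : 0 < p.length := List.length_pos_iff.mpr hp
  intro f
  induction f with
  | zero => intro s hs; omega
  | succ f ih =>
    intro s hf
    by_cases hc : PySem.Chars.startswith s p = true
    · have hle : p.length ≤ s.length :=
        ((PySem.Chars.startswith_iff _ _).mp hc).length_le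
      have hlen : (PySem.Chars.stripChars (s.drop p.length) [',']).length < s.length := by
        have h1 := pvStrip_length_le (s.drop p.length)
        rw [pvStrip] at h1
        rw [List.length_drop] at h1
        omega
      simp only [pvGoA, pvPhase1, if_pos hc]
      exact ih _ (by omega)
    · simp only [pvPhase1, if_neg hc]
      exact pvGoA_suffix p hp (f+1) s hf (fun h => hc ((PySem.Chars.startswith_iff _ _).mpr h))

-- ===== VERDICT (by name: the statement is the Claim_ definition above) =====
theorem remove_pattern_spec : Claim_equal_remove_pattern := by
  intro string pattern _ hpre
  unfold Spec_remove_pattern remove_pattern remove_pattern_alt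
  have hp : pattern.toList ≠ [] := by
    intro h
    exact hpre (by rwa [← String.toList_eq_nil_iff])
  rw [pvGoA_eq pattern.toList hp (string.toList.length + 1) string.toList (by omega)]
  simp only [pvSufRes, pvStrip]
  split <;> rfl
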